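-- pv_equiv track=rewrite | github.com/Mancharan/time-complexity-analysis | strassen.py | join_matrices
-- ===== SOURCE A (Python) =====
-- def join_matrices(A11, A12, A21, A22):
--     n2 = len(A11)
--     n = n2 * 2
--     A = [[0 for _ in range(n)] for _ in range(n)]
--     for i in range(n2):
--         for j in range(n2):
--             A[i][j] = A11[i][j]
--             A[i][j + n2] = A12[i][j]
--             A[i + n2][j] = A21[i][j]
--             A[i + n2][j + n2] = A22[i][j]
--     return A
-- ===== SOURCE B (Python) =====
-- def join_matrices(A11, A12, A21, A22):
--     n2 = len(A11)
--     top = [A11[i][:n2] + A12[i][:n2] for i in range(n2)]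
--     bottom = [A21[i][:n2] + A22[i][:n2] for i in range(n2)]
--     return top + bottom
-- ===== Notes on version B (the rewrite author's own statement) =====
-- stated objective: simpler
-- what changed: Replaces the zero-preallocated n x n matrix and the nested per-cell assignment loops by building each result row directly as a splice of the two quadrant rows (top half then bottom half), with no inner column loop.
import Mathlib
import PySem

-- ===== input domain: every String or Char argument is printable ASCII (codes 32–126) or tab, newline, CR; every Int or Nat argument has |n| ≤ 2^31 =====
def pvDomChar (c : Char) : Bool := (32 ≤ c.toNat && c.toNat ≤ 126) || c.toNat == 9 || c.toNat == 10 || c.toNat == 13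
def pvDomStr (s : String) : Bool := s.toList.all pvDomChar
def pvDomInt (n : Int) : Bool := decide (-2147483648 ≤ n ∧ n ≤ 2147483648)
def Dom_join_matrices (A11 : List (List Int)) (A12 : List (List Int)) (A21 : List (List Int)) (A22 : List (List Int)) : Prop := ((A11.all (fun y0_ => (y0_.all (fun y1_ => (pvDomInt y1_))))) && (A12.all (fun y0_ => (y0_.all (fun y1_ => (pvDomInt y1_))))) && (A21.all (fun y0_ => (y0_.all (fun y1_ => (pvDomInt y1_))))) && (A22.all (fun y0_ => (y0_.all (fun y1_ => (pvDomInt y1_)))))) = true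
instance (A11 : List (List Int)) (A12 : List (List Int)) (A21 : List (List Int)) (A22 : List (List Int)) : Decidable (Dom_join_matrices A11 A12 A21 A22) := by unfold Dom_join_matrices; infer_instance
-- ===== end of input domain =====

-- B builds each output row directly by splicing the two quadrant rows (no preallocated
-- zero matrix, no inner column loop); same values as A wherever A returns.

-- ===== PORT A =====
-- M[i][j] read / write on Nat indices (Python indices here are range-generated, hence
-- nonnegative; Pre_ keeps them in range, where getD/set are exact).
def pvGet2 (M : List (List Int)) (i j : Nat) : Int := (M.getD i []).getD j 0
def pvSet2 (M : List (List Int)) (i j : Nat) (v : Int) : List (List Int) :=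
  M.set i ((M.getD i []).set j v)

def join_matrices (A11 : List (List Int)) (A12 : List (List Int)) (A21 : List (List Int)) (A22 : List (List Int)) : List (List Int) :=
  let n2 := A11.length
  let n := n2 * 2
  let A0 := List.replicate n (List.replicate n (0 : Int))
  (List.range n2).foldl (fun A i =>
    (List.range n2).foldl (fun A j =>
      let A := pvSet2 A i j (pvGet2 A11 i j)
      let A := pvSet2 A i (j + n2) (pvGet2 A12 i j)
      let A := pvSet2 A (i + n2) j (pvGet2 A21 i j)
      pvSet2 A (i + n2) (j + n2) (pvGet2 A22 i j)) A) A0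

-- ===== PORT B =====
def join_matrices_alt (A11 : List (List Int)) (A12 : List (List Int)) (A21 : List (List Int)) (A22 : List (List Int)) : List (List Int) :=
  let n2 := A11.length
  let top := (List.range n2).map (fun i => (A11.getD i []).take n2 ++ (A12.getD i []).take n2)
  let bottom := (List.range n2).map (fun i => (A21.getD i []).take n2 ++ (A22.getD i []).take n2)
  top ++ bottom

-- ===== PRECONDITION & SPEC =====
-- Pre_ is exactly the set of inputs on which the Python A returns (elsewhere A raises
-- IndexError): each of A12, A21, A22 has at least n2 = len(A11) rows, and each of the
-- first n2 rows of all four matrices has at least n2 entries.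
def Pre_join_matrices (A11 : List (List Int)) (A12 : List (List Int)) (A21 : List (List Int)) (A22 : List (List Int)) : Prop :=
  A11.length ≤ A12.length ∧ A11.length ≤ A21.length ∧ A11.length ≤ A22.length ∧
  (∀ r ∈ A11, A11.length ≤ r.length) ∧
  (∀ r ∈ A12.take A11.length, A11.length ≤ r.length) ∧
  (∀ r ∈ A21.take A11.length, A11.length ≤ r.length) ∧
  (∀ r ∈ A22.take A11.length, A11.length ≤ r.length)
instance (A11 : List (List Int)) (A12 : List (List Int)) (A21 : List (List Int)) (A22 : List (List Int)) : Decidable (Pre_join_matrices A11 A12 A21 A22) := by unfold Pre_join_matrices; infer_instance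

def pvWitness_join_matrices : List (List Int) × List (List Int) × List (List Int) × List (List Int) :=
  ([[1, 2], [3, 4]], [[5, 6], [7, 8]], [[9, 10], [11, 12]], [[13, 14], [15, 16]])

def Spec_join_matrices (A11 : List (List Int)) (A12 : List (List Int)) (A21 : List (List Int)) (A22 : List (List Int)) (out : List (List Int)) : Prop := out = join_matrices_alt A11 A12 A21 A22
instance (A11 : List (List Int)) (A12 : List (List Int)) (A21 : List (List Int)) (A22 : List (List Int)) (out : List (List Int)) : Decidable (Spec_join_matrices A11 A12 A21 A22 out) := by unfold Spec_join_matrices; infer_instance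

-- ===== CLAIM (what is proved, stated in full; the proofs are below) =====
def Claim_equal_join_matrices : Prop := ∀ (A11 : List (List Int)) (A12 : List (List Int)) (A21 : List (List Int)) (A22 : List (List Int)), Dom_join_matrices A11 A12 A21 A22 → Pre_join_matrices A11 A12 A21 A22 → Spec_join_matrices A11 A12 A21 A22 (join_matrices A11 A12 A21 A22)

-- ===== LEMMAS AND PROOFS =====

-- step on a single row: set positions j and j + n2
def pvRowStep (a b : Nat → Int) (n2 : Nat) (r : List Int) (j : Nat) : List Int :=
  (r.set j (a j)).set (j + n2) (b j)

theorem pvRowStep_length (a b : Nat → Int) (n2 : Nat) (r : List Int) (j : Nat) :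
    (pvRowStep a b n2 r j).length = r.length := by
  simp [pvRowStep]

theorem pvRowFold_length (a b : Nat → Int) (n2 : Nat) (l : List Nat) (r : List Int) :
    (l.foldl (pvRowStep a b n2) r).length = r.length := by
  induction l generalizing r with
  | nil => rfl
  | cons j l ih => simp [List.foldl_cons, ih, pvRowStep_length]

-- the inner j-loop equals two independent row folds on rows i and i+n2
theorem pvInner_eq (A11 A12 A21 A22 : List (List Int)) (n2 : Nat) (l : List Nat)
    (A : List (List Int)) (i : Nat)
    (hi : i < A.length) (hin : i + n2 < A.length) (hne : i ≠ i + n2) :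
    l.foldl (fun A j =>
      let A := pvSet2 A i j (pvGet2 A11 i j)
      let A := pvSet2 A i (j + n2) (pvGet2 A12 i j)
      let A := pvSet2 A (i + n2) j (pvGet2 A21 i j)
      pvSet2 A (i + n2) (j + n2) (pvGet2 A22 i j)) A
    = (A.set i (l.foldl (pvRowStep (pvGet2 A11 i) (pvGet2 A12 i) n2) (A.getD i []))).set
        (i + n2) (l.foldl (pvRowStep (pvGet2 A21 i) (pvGet2 A22 i) n2) (A.getD (i + n2) [])) := by
  induction l generalizing A with
  | nil =>
    simp only [List.foldl_nil]
    rw [List.getD_eq_getElem?_getD, List.getD_eq_getElem?_getD,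
        List.getElem?_eq_getElem hi, List.getElem?_eq_getElem hin]
    simp
  | cons j l ih =>
    simp only [List.foldl_cons]
    have hA' : (pvSet2 (pvSet2 (pvSet2 (pvSet2 A i j (pvGet2 A11 i j)) i (j + n2) (pvGet2 A12 i j)) (i + n2) j (pvGet2 A21 i j)) (i + n2) (j + n2) (pvGet2 A22 i j))
        = (A.set i (pvRowStep (pvGet2 A11 i) (pvGet2 A12 i) n2 (A.getD i []) j)).set
            (i + n2) (pvRowStep (pvGet2 A21 i) (pvGet2 A22 i) n2 (A.getD (i + n2) []) j) := by
      simp only [pvSet2, List.getD_eq_getElem?_getD, List.set_set]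
      rw [List.getElem?_set_self (by simpa using hi)]
      rw [List.getElem?_set_ne hne]
      rw [List.getElem?_set_self (by simpa using hin)]
      simp [pvRowStep]
    rw [hA', ih _ (by simpa using hi) (by simpa using hin)]
    rw [List.set_comm _ _ hne, List.set_set, List.set_comm _ _ (Ne.symm hne), List.set_set]
    congr 2
    · rw [List.getD_eq_getElem?_getD, List.getElem?_set_ne (Ne.symm hne),
          List.getElem?_set_self (by simpa using hi)]
      rfl
    · rw [List.getD_eq_getElem?_getD, List.getElem?_set_self (by simpa using hin)]
      rfl

-- pointwise characterisation of a row fold over range m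
theorem pvRowFold_getElem? (a b : Nat → Int) (n2 : Nat) (r0 : List Int)
    (h0 : r0.length = 2 * n2) :
    ∀ m, m ≤ n2 → ∀ c,
      ((List.range m).foldl (pvRowStep a b n2) r0)[c]? =
        if c < m then some (a c)
        else if n2 ≤ c ∧ c < n2 + m then some (b (c - n2))
        else r0[c]? := by
  intro m
  induction m with
  | zero => intro _ c; simp
  | succ m ih =>
    intro hm c
    rw [List.range_succ, List.foldl_append, List.foldl_cons, List.foldl_nil]
    have hlen : ((List.range m).foldl (pvRowStep a b n2) r0).length = 2 * n2 := by
      rw [pvRowFold_length, h0]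
    simp only [pvRowStep]
    rw [List.getElem?_set, List.getElem?_set]
    simp only [List.length_set, hlen]
    rw [ih (by omega) c]
    have e1 : m + n2 - n2 = m := by omega
    split_ifs <;> first | rfl | omega | simp_all

-- a fully-run row fold equals the splice of the two quadrant rows
theorem pvRowFold_eq (a b : Nat → Int) (n2 : Nat) (ra rb : List Int)
    (hra : n2 ≤ ra.length) (hrb : n2 ≤ rb.length)
    (ha : ∀ j, j < n2 → a j = ra.getD j 0) (hb : ∀ j, j < n2 → b j = rb.getD j 0) :
    (List.range n2).foldl (pvRowStep a b n2) (List.replicate (2 * n2) (0 : Int)) =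
      ra.take n2 ++ rb.take n2 := by
  apply List.ext_getElem?
  intro c
  rw [pvRowFold_getElem? a b n2 _ (by simp) n2 (le_refl _) c]
  by_cases h1 : c < n2
  · rw [if_pos h1, ha c h1, List.getElem?_append_left (by simp [h1, hra]),
        List.getElem?_take]
    rw [if_pos h1, List.getD_eq_getElem?_getD, List.getElem?_eq_getElem (by omega)]
    simp
  · rw [if_neg h1]
    by_cases h2 : c < 2 * n2
    · rw [if_pos ⟨by omega, by omega⟩, hb _ (by omega),
          List.getElem?_append_right (by simp [hra]; omega)]
      rw [List.length_take, Nat.min_eq_left hra, List.getElem?_take, if_pos (by omega),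
          List.getD_eq_getElem?_getD, List.getElem?_eq_getElem (by omega)]
      simp
    · rw [if_neg (by omega), List.getElem?_eq_none (by simp; omega),
          List.getElem?_eq_none]
      simp only [List.length_append, List.length_take]
      omega

def pvTopRow (A11 A12 : List (List Int)) (n2 : Nat) (i : Nat) : List Int :=
  (List.range n2).foldl (pvRowStep (pvGet2 A11 i) (pvGet2 A12 i) n2) (List.replicate (2 * n2) 0)

theorem pvFoldl_length (f : List (List Int) → Nat → List (List Int))
    (hf : ∀ A x, (f A x).length = A.length) (l : List Nat) (A : List (List Int)) :
    (l.foldl f A).length = A.length := by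
  induction l generalizing A with
  | nil => rfl
  | cons x l ih => rw [List.foldl_cons, ih, hf]

-- pointwise characterisation of the outer i-loop over range m
theorem pvOuter_getElem? (A11 A12 A21 A22 : List (List Int)) (n2 : Nat) :
    ∀ m, m ≤ n2 → ∀ r,
      ((List.range m).foldl (fun A i =>
        (List.range n2).foldl (fun A j =>
          let A := pvSet2 A i j (pvGet2 A11 i j)
          let A := pvSet2 A i (j + n2) (pvGet2 A12 i j)
          let A := pvSet2 A (i + n2) j (pvGet2 A21 i j)
          pvSet2 A (i + n2) (j + n2) (pvGet2 A22 i j)) A)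
        (List.replicate (2 * n2) (List.replicate (2 * n2) (0 : Int))))[r]? =
        if r < m then some (pvTopRow A11 A12 n2 r)
        else if n2 ≤ r ∧ r < n2 + m then some (pvTopRow A21 A22 n2 (r - n2))
        else (List.replicate (2 * n2) (List.replicate (2 * n2) (0 : Int)))[r]? := by
  intro m
  induction m with
  | zero => intro _ r; simp
  | succ m ih =>
    intro hm r
    rw [List.range_succ, List.foldl_append, List.foldl_cons, List.foldl_nil]
    set P := (List.range m).foldl _ (List.replicate (2 * n2) (List.replicate (2 * n2) (0 : Int))) with hP
    have hPlen : P.length = 2 * n2 := by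
      rw [hP]
      rw [pvFoldl_length]
      · simp
      · intro A i
        apply pvFoldl_length
        intro B j
        simp [pvSet2]
    have hm' : m ≤ n2 := by omega
    have hmlt : m < n2 := by omega
    rw [pvInner_eq A11 A12 A21 A22 n2 _ P m (by omega) (by omega) (by omega)]
    have hPm : P.getD m [] = List.replicate (2 * n2) (0 : Int) := by
      rw [List.getD_eq_getElem?_getD, ih hm' m, if_neg (by omega), if_neg (by omega)]
      rw [List.getElem?_replicate, if_pos (by omega)]
      simp
    have hPmn : P.getD (m + n2) [] = List.replicate (2 * n2) (0 : Int) := by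
      rw [List.getD_eq_getElem?_getD, ih hm' (m + n2), if_neg (by omega), if_neg (by omega)]
      rw [List.getElem?_replicate, if_pos (by omega)]
      simp
    rw [hPm, hPmn]
    rw [List.getElem?_set, List.getElem?_set]
    simp only [List.length_set, hPlen]
    rw [ih hm' r]
    have e1 : m + n2 - n2 = m := by omega
    split_ifs <;> first | rfl | omega | simp_all [pvTopRow]

theorem pvMem_take_row {M : List (List Int)} {n2 i : Nat} (hi : i < n2) (hlen : n2 ≤ M.length) :
    M.getD i [] ∈ M.take n2 := by
  rw [List.getD_eq_getElem?_getD, List.getElem?_eq_getElem (show i < M.length by omega)]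
  simp only [Option.getD_some]
  rw [List.mem_iff_getElem?]
  exact ⟨i, by rw [List.getElem?_take, if_pos hi, List.getElem?_eq_getElem]⟩

-- ===== VERDICT (by name: the statement is the Claim_ definition above) =====
theorem join_matrices_spec : Claim_equal_join_matrices := by
  intro A11 A12 A21 A22 _hDom hPre
  obtain ⟨h12, h21, h22, hr11, hr12, hr21, hr22⟩ := hPre
  unfold Spec_join_matrices
  dsimp only [join_matrices, join_matrices_alt]
  set n2 := A11.length with hn2
  apply List.ext_getElem?
  intro r
  have h2n : n2 * 2 = 2 * n2 := by omega
  rw [h2n]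
  rw [pvOuter_getElem? A11 A12 A21 A22 n2 n2 (le_refl _) r]
  have hrowlen : ∀ (M : List (List Int)), n2 ≤ M.length →
      (∀ s ∈ M.take n2, n2 ≤ s.length) → ∀ i, i < n2 → n2 ≤ (M.getD i []).length := by
    intro M hM hs i hi
    exact hs _ (pvMem_take_row hi hM)
  have hA11take : A11.take n2 = A11 := by simp [hn2]
  have hr11' : ∀ s ∈ A11.take n2, n2 ≤ s.length := by rw [hA11take]; exact hr11
  by_cases h1 : r < n2
  · rw [if_pos h1]
    rw [List.getElem?_append_left (by simpa using h1), List.getElem?_map,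
        List.getElem?_range h1]
    simp only [Option.map_some]
    congr 1
    unfold pvTopRow
    exact pvRowFold_eq _ _ n2 _ _ (hrowlen A11 (by omega) hr11' r h1)
      (hrowlen A12 h12 hr12 r h1) (fun j _ => rfl) (fun j _ => rfl)
  · rw [if_neg h1]
    by_cases h2 : r < 2 * n2
    · rw [if_pos ⟨by omega, by omega⟩]
      rw [List.getElem?_append_right (by simpa using (show n2 ≤ r by omega)),
          List.getElem?_map, List.length_map, List.length_range,
          List.getElem?_range (by omega)]
      simp only [Option.map_some]
      congr 1
      unfold pvTopRow
      exact pvRowFold_eq _ _ n2 _ _ (hrowlen A21 h21 hr21 _ (by omega))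
        (hrowlen A22 h22 hr22 _ (by omega)) (fun j _ => rfl) (fun j _ => rfl)
    · rw [if_neg (by omega), List.getElem?_eq_none (by simp; omega),
          List.getElem?_eq_none (by simp; omega)]
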